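-- pv_equiv track=rewrite | github.com/Open-CAS/open-cas-linux | test/functional/tests/stats/test_consistency_between_outputs.py | separate_values_to_two_lines
-- ===== SOURCE A (Python) =====
-- def separate_values_to_two_lines(table_as_list: list, column_width: int):
--     """
--     If there are two values of the one statistic in different units in one line,
--     replace this line with two lines, each containing value in one unit.
--     """
--     for i, line in enumerate(table_as_list):
--         has_two_units = " / " in line
--         if has_two_units:
--             table_as_list.remove(line)
--             value_parts = line[column_width:].split(" / ")
--
--             table_as_list.insert(i, line[:column_width] + value_parts[0])
--             table_as_list.insert(i + 1, line[:column_width] + value_parts[1])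
--
--     return table_as_list
-- ===== SOURCE B (Python) =====
-- def separate_values_to_two_lines(table_as_list: list, column_width: int):
--     """
--     Single pass building a NEW list: a line containing " / " after the value
--     column contributes its two per-unit lines, any other line is kept as is.
--     (The original implementation splices the list in place while iterating;
--     this one never mutates its argument -- the RETURN value is the same.)
--     """
--     result = []
--     for line in table_as_list:
--         if " / " in line:
--             prefix = line[:column_width]
--             parts = line[column_width:].split(" / ")
--             result.append(prefix + parts[0])
--             result.append(prefix + parts[1])
--         else:
--             result.append(line)
--     return result
-- ===== Notes on version B (the rewrite author's own statement) =====
-- stated objective: simpler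
-- what changed: A splices the list in place (remove + two inserts) while iterating over it with enumerate and re-visits the freshly inserted second line; B is a single non-mutating pass that appends either the two split lines or the original line to a new list.
-- outside the precondition, e.g. on separate_values_to_two_lines(['  /  / '], -3): A returns ['  / ', ' ', ' '], B returns ['  / ', '  / ']
import Mathlib
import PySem

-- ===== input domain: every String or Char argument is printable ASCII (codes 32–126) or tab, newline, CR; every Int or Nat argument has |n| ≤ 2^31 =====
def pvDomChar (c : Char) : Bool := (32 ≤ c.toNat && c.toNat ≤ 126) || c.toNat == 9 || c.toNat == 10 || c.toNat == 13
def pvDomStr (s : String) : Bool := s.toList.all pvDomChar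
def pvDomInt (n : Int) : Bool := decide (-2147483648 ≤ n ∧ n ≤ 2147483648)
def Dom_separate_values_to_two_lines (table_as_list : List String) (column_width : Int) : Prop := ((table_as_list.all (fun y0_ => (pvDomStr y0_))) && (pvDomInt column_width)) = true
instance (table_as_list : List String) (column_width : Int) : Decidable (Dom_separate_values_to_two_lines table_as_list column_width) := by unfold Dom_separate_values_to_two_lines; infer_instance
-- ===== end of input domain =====

-- B replaces A's in-place remove/insert splicing (re-scanned by enumerate) with one
-- non-mutating pass that appends split or unchanged lines to a new list (simpler; the
-- equivalence is about the RETURN value only: A mutates its argument, B does not).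


-- ===== PORT A =====
-- A's `for i, line in enumerate(table)` over the list it mutates: one step per index i,
-- stopping as soon as i reaches the CURRENT length; one fuel unit per loop iteration
-- (2*len+1 units cover every iteration A performs on inputs admitted by Pre_ below).
def pvLoopA (column_width : Int) : Nat → List String → Nat → List String
  | 0, lst, _ => lst
  | fuel + 1, lst, i =>
    if i < lst.length then
      let line := lst.getD i ""
      if PySem.Str.isIn " / " line then
        let lst1 := (PySem.List.remove? lst line).getD lst
        let pre := PySem.Str.slice line none (some column_width)
        let parts := (PySem.Str.split? (PySem.Str.slice line (some column_width) none) " / ").getD []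
        let lst2 := PySem.List.insert lst1 (i : Int) (pre ++ parts.getD 0 "")
        let lst3 := PySem.List.insert lst2 ((i : Int) + 1) (pre ++ parts.getD 1 "")
        pvLoopA column_width fuel lst3 (i + 1)
      else pvLoopA column_width fuel lst (i + 1)
    else lst

def separate_values_to_two_lines (table_as_list : List String) (column_width : Int) : List String :=
  pvLoopA column_width (2 * table_as_list.length + 1) table_as_list 0

-- ===== PORT B =====
def separate_values_to_two_lines_alt (table_as_list : List String) (column_width : Int) : List String :=
  table_as_list.foldl
    (fun result line =>
      if PySem.Str.isIn " / " line then
        let prefix_ := PySem.Str.slice line none (some column_width)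
        let parts := (PySem.Str.split? (PySem.Str.slice line (some column_width) none) " / ").getD []
        (result ++ [prefix_ ++ parts.getD 0 ""]) ++ [prefix_ ++ parts.getD 1 ""]
      else result ++ [line]) []

-- ===== PRECONDITION & SPEC =====
-- Pre_ excludes (a) inputs where A raises IndexError (a line contains " / " but the part
-- after column_width does not, so the split yields a single piece), and (b) inputs where a
-- rebuilt half-line still contains " / " — there A's remove/insert during the iteration
-- re-splits freshly inserted lines or removes an equal earlier line, an artefact of
-- mutating the list while enumerating it.
def pvLineOK (column_width : Int) (L : String) : Bool :=
  !(PySem.Str.isIn " / " L) ||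
  (decide (2 ≤ ((PySem.Str.split? (PySem.Str.slice L (some column_width) none) " / ").getD []).length) &&
   !(PySem.Str.isIn " / " (PySem.Str.slice L none (some column_width) ++ ((PySem.Str.split? (PySem.Str.slice L (some column_width) none) " / ").getD []).getD 0 "")) &&
   !(PySem.Str.isIn " / " (PySem.Str.slice L none (some column_width) ++ ((PySem.Str.split? (PySem.Str.slice L (some column_width) none) " / ").getD []).getD 1 "")))

def Pre_separate_values_to_two_lines (table_as_list : List String) (column_width : Int) : Prop :=
  ∀ L ∈ table_as_list, pvLineOK column_width L = true

instance (table_as_list : List String) (column_width : Int) : Decidable (Pre_separate_values_to_two_lines table_as_list column_width) := by unfold Pre_separate_values_to_two_lines; infer_instance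

def pvWitness_separate_values_to_two_lines : List String × Int :=
  (["Reads   4 KiB / 1 %", "Writes  8"], 8)

def Spec_separate_values_to_two_lines (table_as_list : List String) (column_width : Int) (out : List String) : Prop := out = separate_values_to_two_lines_alt table_as_list column_width
instance (table_as_list : List String) (column_width : Int) (out : List String) : Decidable (Spec_separate_values_to_two_lines table_as_list column_width out) := by unfold Spec_separate_values_to_two_lines; infer_instance

-- ===== CLAIM (what is proved, stated in full; the proofs are below) =====
def Claim_equal_separate_values_to_two_lines : Prop := ∀ (table_as_list : List String) (column_width : Int), Dom_separate_values_to_two_lines table_as_list column_width → Pre_separate_values_to_two_lines table_as_list column_width → Spec_separate_values_to_two_lines table_as_list column_width (separate_values_to_two_lines table_as_list column_width)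

-- ===== LEMMAS AND PROOFS =====

-- the one or two lines a single table line contributes to the result
def pvExpand (column_width : Int) (L : String) : List String :=
  if PySem.Str.isIn " / " L then
    [PySem.Str.slice L none (some column_width) ++ ((PySem.Str.split? (PySem.Str.slice L (some column_width) none) " / ").getD []).getD 0 "",
     PySem.Str.slice L none (some column_width) ++ ((PySem.Str.split? (PySem.Str.slice L (some column_width) none) " / ").getD []).getD 1 ""]
  else [L]

lemma pv_alt_eq_flatMap (w : Int) (t : List String) (acc : List String) :
    t.foldl
      (fun result line =>
        if PySem.Str.isIn " / " line then
          let prefix_ := PySem.Str.slice line none (some w)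
          let parts := (PySem.Str.split? (PySem.Str.slice line (some w) none) " / ").getD []
          (result ++ [prefix_ ++ parts.getD 0 ""]) ++ [prefix_ ++ parts.getD 1 ""]
        else result ++ [line]) acc = acc ++ t.flatMap (pvExpand w) := by
  induction t generalizing acc with
  | nil => rw [List.foldl_nil, List.flatMap_nil, List.append_nil]
  | cons L t ih =>
    rw [List.foldl_cons, List.flatMap_cons]
    dsimp only
    by_cases h : PySem.Str.isIn " / " L = true
    · rw [if_pos h, ih]
      unfold pvExpand
      rw [if_pos h]
      simp only [List.append_assoc, List.cons_append, List.nil_append]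
    · rw [if_neg h, ih]
      unfold pvExpand
      rw [if_neg h]
      simp only [List.append_assoc, List.singleton_append]

lemma pv_loopA_eq (w : Int) :
    ∀ (fuel : Nat) (rest done : List String),
      rest.length + rest.countP (fun L => PySem.Str.isIn " / " L) ≤ fuel →
      (∀ L ∈ rest, pvLineOK w L = true) →
      (∀ x ∈ done, PySem.Str.isIn " / " x = false) →
      pvLoopA w fuel (done ++ rest) done.length = done ++ rest.flatMap (pvExpand w) := by
  intro fuel
  induction fuel with
  | zero =>
    intro rest done hfuel _ _
    have hnil : rest = [] := by
      rw [← List.length_eq_zero_iff]; omega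
    subst hnil
    rw [List.flatMap_nil, List.append_nil, pvLoopA]
  | succ fuel ih =>
    intro rest done hfuel hrest hdone
    cases rest with
    | nil =>
      rw [List.flatMap_nil, List.append_nil, pvLoopA,
        if_neg (by omega : ¬ done.length < done.length)]
    | cons L rest' =>
      have hlen : done.length < (done ++ L :: rest').length := by simp
      have hget : (done ++ L :: rest').getD done.length "" = L := by
        simp [List.getD_eq_getElem?_getD]
      rw [List.flatMap_cons, pvLoopA, if_pos hlen]
      rw [hget]
      by_cases hsep : PySem.Str.isIn " / " L = true
      · -- a two-unit line: A removes it and inserts its two half-lines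
        have hok := hrest L (List.mem_cons_self)
        rw [pvLineOK, hsep] at hok
        simp only [Bool.not_true, Bool.false_or, Bool.and_eq_true, Bool.not_eq_true',
          decide_eq_true_eq] at hok
        obtain ⟨⟨h2, hp0⟩, hp1⟩ := hok
        have hsep' : PySem.Chars.isIn [' ', '/', ' '] L.toList = true := by simpa using hsep
        have hLnotdone : L ∉ done := fun hmem => by
          have hfree := hdone L hmem; rw [hsep] at hfree; cases hfree
        rw [if_pos hsep]
        dsimp only
        set pre := PySem.Str.slice L none (some w) with hpre
        set parts := (PySem.Str.split? (PySem.Str.slice L (some w) none) " / ").getD [] with hparts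
        have hp1' : PySem.Chars.isIn [' ', '/', ' '] (pre.toList ++ (parts[1]?.getD "").toList) = false := by
          simpa using hp1
        have hremove : (PySem.List.remove? (done ++ L :: rest') L).getD (done ++ L :: rest')
            = done ++ rest' := by
          have hm : L ∈ done ++ L :: rest' := by simp
          have h1 := PySem.List.remove?_eq_some_erase (done ++ L :: rest') L hm
          rw [h1]
          simp [List.erase_append_right _ hLnotdone]
        rw [hremove]
        have hins1 : PySem.List.insert (done ++ rest') (done.length : Int)
            (pre ++ parts.getD 0 "") = done ++ (pre ++ parts.getD 0 "") :: rest' := by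
          rw [PySem.List.insert_natCast _ _ _ (by simp),
            List.take_left' rfl, List.drop_left' rfl]
        rw [hins1]
        have hins2 : PySem.List.insert (done ++ (pre ++ parts.getD 0 "") :: rest')
            ((done.length : Int) + 1) (pre ++ parts.getD 1 "")
            = (done ++ [pre ++ parts.getD 0 ""]) ++ (pre ++ parts.getD 1 "") :: rest' := by
          rw [show ((done.length : Int) + 1) = ((done.length + 1 : Nat) : Int) by push_cast; ring,
            PySem.List.insert_natCast _ _ _ (by simp),
            show done ++ (pre ++ parts.getD 0 "") :: rest'
              = (done ++ [pre ++ parts.getD 0 ""]) ++ rest' by simp,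
            List.take_left' (by simp), List.drop_left' (by simp)]
        rw [hins2,
          show done.length + 1 = (done ++ [pre ++ parts.getD 0 ""]).length by simp,
          ih ((pre ++ parts.getD 1 "") :: rest') (done ++ [pre ++ parts.getD 0 ""])
            (by have hc : (L :: rest').countP (fun L => PySem.Str.isIn " / " L)
                  = rest'.countP (fun L => PySem.Str.isIn " / " L) + 1 := by
                    simp [hsep']
                have hc2 : ((pre ++ parts.getD 1 "") :: rest').countP
                    (fun L => PySem.Str.isIn " / " L)
                  = rest'.countP (fun L => PySem.Str.isIn " / " L) := by
                    simp [hp1']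
                rw [hc] at hfuel
                rw [hc2]
                simp only [List.length_cons] at hfuel ⊢
                omega)
            (by intro x hx
                rcases List.mem_cons.mp hx with hx | hx
                · subst hx
                  rw [pvLineOK, hp1]
                  simp
                · exact hrest x (List.mem_cons_of_mem _ hx))
            (by intro x hx
                rcases List.mem_append.mp hx with hx | hx
                · exact hdone x hx
                · rw [List.mem_singleton] at hx; subst hx; exact hp0),
          List.flatMap_cons]
        unfold pvExpand
        rw [if_neg (by rw [hp1]; simp), if_pos hsep, ← hpre, ← hparts]
        simp only [List.append_assoc, List.cons_append, List.nil_append]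
      · -- an ordinary line is kept as is
        have hsep' : PySem.Chars.isIn [' ', '/', ' '] L.toList = false := by
          simpa using Bool.not_eq_true _ ▸ hsep
        rw [if_neg hsep,
          show done ++ L :: rest' = (done ++ [L]) ++ rest' by simp,
          show done.length + 1 = (done ++ [L]).length by simp,
          ih rest' (done ++ [L])
            (by have hc : (L :: rest').countP (fun L => PySem.Str.isIn " / " L)
                  = rest'.countP (fun L => PySem.Str.isIn " / " L) := by
                    simp [hsep']
                rw [hc] at hfuel
                simp only [List.length_cons] at hfuel
                omega)
            (fun x hx => hrest x (List.mem_cons_of_mem _ hx))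
            (by intro x hx
                rcases List.mem_append.mp hx with hx | hx
                · exact hdone x hx
                · rw [List.mem_singleton] at hx; subst hx
                  exact Bool.not_eq_true _ ▸ hsep)]
        unfold pvExpand
        rw [if_neg hsep]
        simp only [List.append_assoc, List.singleton_append]

-- ===== VERDICT (by name: the statement is the Claim_ definition above) =====
theorem separate_values_to_two_lines_spec : Claim_equal_separate_values_to_two_lines := by
  intro table w _hdom hpre
  unfold Spec_separate_values_to_two_lines separate_values_to_two_lines separate_values_to_two_lines_alt
  rw [pv_alt_eq_flatMap]
  have h := pv_loopA_eq w (2 * table.length + 1) table []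
    (by have := List.countP_le_length (l := table) (p := fun L => PySem.Str.isIn " / " L); omega)
    hpre (by simp)
  simpa using h
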